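-- pv_equiv track=rewrite | github.com/printjin-gmailcom/2024--Code_States-SSU-Coding_Test | image12.py | solution
-- ===== SOURCE A (Python) =====
-- def solution(query):
-- 	history = ["blank"]
-- 	idx = 0
--
-- 	answer = []
--
-- 	for q in query:
-- 		if "MOV" in q:
-- 			a, url = q.split()
-- 			if url in history:
-- 				idx = history.index(url)
-- 			else:
-- 				history = history[:idx+1]
-- 				history.append(url)
-- 				idx += 1
--
-- 		if "DEL" in q:
-- 			a, url = q.split()
-- 			if url not in history or history[idx] == url:
-- 				continue
-- 			else:
-- 				if history.index(url) < idx: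
-- 					idx -= 1
-- 				history.remove(url)
--
-- 		if "BCK" in q:
-- 			if idx != 0:
-- 				idx -= 1
-- 			answer.append(history[idx])
--
-- 		if "FWD" in q:
-- 			if idx < len(history) - 1:
-- 				idx += 1
-- 			answer.append(history[idx])
--
-- 	return answer
-- ===== SOURCE B (Python) =====
-- def solution(query):
--     # Browser history as a two-stack zipper: pages behind in `back` (nearest on top),
--     # pages ahead in `fwd` (nearest on top), plus the current page.
--     back, cur, fwd = [], "blank", []
--     answer = []
--     for q in query:
--         if "MOV" in q:
--             _, url = q.split()
--             if url == cur:
--                 pass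
--             elif url in back:
--                 while cur != url:
--                     fwd.append(cur)
--                     cur = back.pop()
--             elif url in fwd:
--                 while cur != url:
--                     back.append(cur)
--                     cur = fwd.pop()
--             else:
--                 fwd = []
--                 back.append(cur)
--                 cur = url
--         if "DEL" in q:
--             _, url = q.split()
--             if url == cur or (url not in back and url not in fwd):
--                 continue
--             if url in back:
--                 back.remove(url)
--             else:
--                 fwd.remove(url)
--         if "BCK" in q:
--             if back:
--                 fwd.append(cur)
--                 cur = back.pop()
--             answer.append(cur)
--         if "FWD" in q:
--             if fwd:
--                 back.append(cur)
--                 cur = fwd.pop()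
--             answer.append(cur)
--     return answer
-- ===== Notes on version B (the rewrite author's own statement) =====
-- stated objective: alternative
-- what changed: Replaces A's single history list with index arithmetic (in/.index/.remove/slice scans) by a two-stack back/forward zipper that keeps the current page explicit, so BCK/FWD are O(1) stack moves and no index is ever computed.
import Mathlib
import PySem

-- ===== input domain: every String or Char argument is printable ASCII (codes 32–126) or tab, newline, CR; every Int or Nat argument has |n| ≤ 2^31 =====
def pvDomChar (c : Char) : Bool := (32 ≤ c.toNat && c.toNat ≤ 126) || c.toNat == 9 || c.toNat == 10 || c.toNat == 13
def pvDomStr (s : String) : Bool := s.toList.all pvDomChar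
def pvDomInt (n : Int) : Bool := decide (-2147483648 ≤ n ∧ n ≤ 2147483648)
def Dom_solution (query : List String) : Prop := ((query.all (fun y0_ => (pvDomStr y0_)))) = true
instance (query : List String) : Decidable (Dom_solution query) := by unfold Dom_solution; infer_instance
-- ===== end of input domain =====

-- B replaces A's history list + index arithmetic by a two-stack back/forward zipper; objective: alternative (same cost class).

-- ===== PORT A =====
-- A keeps (history, idx, answer); each `if "…" in q` block of A's loop body is one helper.
-- the `if "MOV" in q:` block
def movA (q : String) (history : List String) (idx : Int) : List String × Int :=
  if PySem.Str.isIn "MOV" q then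
    match PySem.Str.split₀ q with
    | [_, url] =>
      if url ∈ history then
        (history, ((PySem.List.index? history url).getD 0 : Nat))
      else
        (PySem.List.slice history none (some (idx + 1)) ++ [url], idx + 1)
    | _ => (history, idx)  -- Python raises ValueError (unpack) here; excluded by Pre_
  else (history, idx)

-- the `if "DEL" in q:` block; the Bool is the `continue` flag
def delA (q : String) (history : List String) (idx : Int) : List String × Int × Bool :=
  if PySem.Str.isIn "DEL" q then
    match PySem.Str.split₀ q with
    | [_, url] =>
      if url ∉ history ∨ PySem.List.pyGetD history idx "" = url then (history, idx, true)
      else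
        let idx' : Int := if ((PySem.List.index? history url).getD 0 : Nat) < idx then idx - 1 else idx
        ((PySem.List.remove? history url).getD history, idx', false)
    | _ => (history, idx, true)  -- Python raises ValueError here; excluded by Pre_
  else (history, idx, false)

-- the `if "BCK" in q:` block
def bckA (q : String) (history : List String) (idx : Int) (answer : List String) : Int × List String :=
  if PySem.Str.isIn "BCK" q then
    let idx := if idx ≠ 0 then idx - 1 else idx
    (idx, answer ++ [PySem.List.pyGetD history idx ""])
  else (idx, answer)

-- the `if "FWD" in q:` block
def fwdA (q : String) (history : List String) (idx : Int) (answer : List String) : Int × List String :=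
  if PySem.Str.isIn "FWD" q then
    let idx := if idx < (history.length : Int) - 1 then idx + 1 else idx
    (idx, answer ++ [PySem.List.pyGetD history idx ""])
  else (idx, answer)

def stepA (st : List String × Int × List String) (q : String) : List String × Int × List String :=
  let p1 := movA q st.1 st.2.1
  let p2 := delA q p1.1 p1.2
  if p2.2.2 then (p2.1, p2.2.1, st.2.2)
  else
    let p3 := bckA q p2.1 p2.2.1 st.2.2
    let p4 := fwdA q p2.1 p3.1 p3.2
    (p2.1, p4.1, p4.2)

def solution (query : List String) : List String :=
  (query.foldl stepA (["blank"], (0 : Int), ([] : List String))).2.2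

-- ===== PORT B =====
-- Source B's `while cur != url: fwd.append(cur); cur = back.pop()` (stack top = list head here)
def seekBack (back : List String) (cur : String) (fwd : List String) (url : String) :
    List String × String × List String :=
  if cur = url then (back, cur, fwd)
  else
    match back with
    | [] => ([], cur, fwd)          -- unreachable: called only when url ∈ back
    | b :: rest => seekBack rest b (cur :: fwd) url
termination_by back.length

-- Source B's `while cur != url: back.append(cur); cur = fwd.pop()`
def seekFwd (back : List String) (cur : String) (fwd : List String) (url : String) :
    List String × String × List String :=
  if cur = url then (back, cur, fwd)
  else
    match fwd with
    | [] => (back, cur, [])         -- unreachable: called only when url ∈ fwd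
    | x :: rest => seekFwd (cur :: back) x rest url
termination_by fwd.length

-- the `if "MOV" in q:` block of Source B
def movB (q : String) (back : List String) (cur : String) (fwd : List String) :
    List String × String × List String :=
  if PySem.Str.isIn "MOV" q then
    match PySem.Str.split₀ q with
    | [_, url] =>
      if url = cur then (back, cur, fwd)
      else if url ∈ back then seekBack back cur fwd url
      else if url ∈ fwd then seekFwd back cur fwd url
      else (cur :: back, url, [])
    | _ => (back, cur, fwd)       -- Python raises here; excluded by Pre_
  else (back, cur, fwd)

-- the `if "DEL" in q:` block of Source B; the Bool is the `continue` flag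
def delB (q : String) (back : List String) (cur : String) (fwd : List String) :
    List String × List String × Bool :=
  if PySem.Str.isIn "DEL" q then
    match PySem.Str.split₀ q with
    | [_, url] =>
      if url = cur ∨ (url ∉ back ∧ url ∉ fwd) then (back, fwd, true)
      else if url ∈ back then ((PySem.List.remove? back url).getD back, fwd, false)
      else (back, (PySem.List.remove? fwd url).getD fwd, false)
    | _ => (back, fwd, true)      -- Python raises here; excluded by Pre_
  else (back, fwd, false)

-- the `if "BCK" in q:` block of Source B
def bckB (q : String) (back : List String) (cur : String) (fwd : List String) (answer : List String) :
    List String × String × List String × List String :=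
  if PySem.Str.isIn "BCK" q then
    match back with
    | b :: rest => (rest, b, cur :: fwd, answer ++ [b])
    | [] => ([], cur, fwd, answer ++ [cur])
  else (back, cur, fwd, answer)

-- the `if "FWD" in q:` block of Source B
def fwdB (q : String) (back : List String) (cur : String) (fwd : List String) (answer : List String) :
    List String × String × List String × List String :=
  if PySem.Str.isIn "FWD" q then
    match fwd with
    | x :: rest => (cur :: back, x, rest, answer ++ [x])
    | [] => (back, cur, [], answer ++ [cur])
  else (back, cur, fwd, answer)

def stepB (st : List String × String × List String × List String) (q : String) :
    List String × String × List String × List String :=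
  let p1 := movB q st.1 st.2.1 st.2.2.1
  let p2 := delB q p1.1 p1.2.1 p1.2.2
  if p2.2.2 then (p2.1, p1.2.1, p2.2.1, st.2.2.2)
  else
    let p3 := bckB q p2.1 p1.2.1 p2.2.1 st.2.2.2
    fwdB q p3.1 p3.2.1 p3.2.2.1 p3.2.2.2

def solution_alt (query : List String) : List String :=
  (query.foldl stepB (([] : List String), "blank", ([] : List String), ([] : List String))).2.2.2

-- ===== PRECONDITION & SPEC =====
-- Pre_ excludes exactly the queries on which A raises ValueError: a query string containing
-- "MOV" or "DEL" whose whitespace-split does not have exactly two tokens (the unpack `a, url = q.split()` fails).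
def Pre_solution (query : List String) : Prop :=
  ∀ q ∈ query, (PySem.Str.isIn "MOV" q = true ∨ PySem.Str.isIn "DEL" q = true) →
    (PySem.Str.split₀ q).length = 2
instance (query : List String) : Decidable (Pre_solution query) := by unfold Pre_solution; infer_instance

def pvWitness_solution : List String := ["MOV a", "MOV b", "BCK", "DEL b", "MOV c", "FWD", "BCK"]

def Spec_solution (query : List String) (out : List String) : Prop := out = solution_alt query
instance (query : List String) (out : List String) : Decidable (Spec_solution query out) := by
  unfold Spec_solution; infer_instance

-- ===== CLAIM (what is proved, stated in full; the proofs are below) =====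
def Claim_equal_solution : Prop :=
  ∀ (query : List String), Dom_solution query → Pre_solution query → Spec_solution query (solution query)

-- ===== LEMMAS AND PROOFS =====

-- the coupling invariant: A's history/idx against B's zipper (back, cur, fwd)
def RInv (history : List String) (idx : Int) (back : List String) (cur : String) (fwd : List String) : Prop :=
  history = back.reverse ++ cur :: fwd ∧ idx = (back.length : Int) ∧ history.Nodup

theorem nodup_parts {b : List String} {c : String} {f : List String}
    (h : (b.reverse ++ c :: f).Nodup) :
    b.Nodup ∧ f.Nodup ∧ c ∉ b ∧ c ∉ f ∧ ∀ x ∈ b, x ∉ f := by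
  simp only [List.nodup_append, List.nodup_cons, List.nodup_reverse, List.mem_reverse, List.mem_cons] at h
  obtain ⟨hb, ⟨hcf, hf⟩, hd⟩ := h
  refine ⟨hb, hf, fun hc => hd c hc c (Or.inl rfl) rfl, hcf, fun x hx hxf => hd x hx x (Or.inr hxf) rfl⟩

theorem index?_of_split {l pre suf : List String} {v : String}
    (hl : l = pre ++ v :: suf) (hv : v ∉ pre) :
    PySem.List.index? l v = some pre.length :=
  (PySem.List.index?_eq_some_iff _ _ _).mpr ⟨pre, suf, hl, rfl, hv⟩

theorem seekBack_spec (url : String) : ∀ (p rest : List String) (cur : String) (fwd : List String),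
    url ∉ p → cur ≠ url →
    seekBack (p ++ url :: rest) cur fwd url = (rest, url, p.reverse ++ cur :: fwd) := by
  intro p
  induction p with
  | nil =>
    intro rest cur fwd _ hc
    rw [seekBack.eq_def]
    simp only [if_neg hc, List.nil_append]
    rw [seekBack.eq_def]
    simp
  | cons a p ih =>
    intro rest cur fwd hp hc
    rw [seekBack.eq_def]
    simp only [if_neg hc, List.cons_append]
    have ha : a ≠ url := fun h => hp (by simp [h])
    rw [ih rest a (cur :: fwd) (fun h => hp (List.mem_cons_of_mem a h)) ha]
    simp

theorem seekFwd_spec (url : String) : ∀ (p rest : List String) (cur : String) (back : List String),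
    url ∉ p → cur ≠ url →
    seekFwd back cur (p ++ url :: rest) url = (p.reverse ++ cur :: back, url, rest) := by
  intro p
  induction p with
  | nil =>
    intro rest cur back _ hc
    rw [seekFwd.eq_def]
    simp only [if_neg hc, List.nil_append]
    rw [seekFwd.eq_def]
    simp
  | cons a p ih =>
    intro rest cur back hp hc
    rw [seekFwd.eq_def]
    simp only [if_neg hc, List.cons_append]
    have ha : a ≠ url := fun h => hp (by simp [h])
    rw [ih rest a (cur :: back) (fun h => hp (List.mem_cons_of_mem a h)) ha]
    simp

theorem getD_rep (pre : List String) (c : String) (suf : List String) :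
    PySem.List.pyGetD (pre ++ c :: suf) (pre.length : Int) "" = c := by
  rw [PySem.List.pyGetD_natCast]
  simp [List.getD]

theorem reverse_erase_nodup {b : List String} (hb : b.Nodup) (u : String) :
    b.reverse.erase u = (b.erase u).reverse := by
  rw [List.Nodup.erase_eq_filter (List.nodup_reverse.mpr hb) u, List.Nodup.erase_eq_filter hb u,
    List.filter_reverse]

theorem first_split {l : List String} {v : String} (h : v ∈ l) :
    ∃ p rest, l = p ++ v :: rest ∧ v ∉ p := by
  obtain ⟨k, hk⟩ := Option.isSome_iff_exists.mp ((PySem.List.index?_isSome_iff l v).mpr h)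
  obtain ⟨p, rest, h1, _, h3⟩ := (PySem.List.index?_eq_some_iff _ _ _).mp hk
  exact ⟨p, rest, h1, h3⟩

theorem index?_bound {l : List String} {v : String} {k : Nat}
    (hk : PySem.List.index? l v = some k) : k < l.length := by
  obtain ⟨p, rest, h1, h2, _⟩ := (PySem.List.index?_eq_some_iff _ _ _).mp hk
  subst h1; subst h2; simp

theorem mov_rel {h : List String} {i : Int} {b : List String} {c : String} {f : List String}
    (q : String) (hr : RInv h i b c f) :
    RInv (movA q h i).1 (movA q h i).2 (movB q b c f).1 (movB q b c f).2.1 (movB q b c f).2.2 := by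
  obtain ⟨hh, hi, hnd⟩ := hr
  obtain ⟨hb, hf, hcb, hcf, hbf⟩ := nodup_parts (hh ▸ hnd)
  by_cases hq : PySem.Str.isIn "MOV" q = true
  case neg => simp only [movA, movB, if_neg hq]; exact ⟨hh, hi, hnd⟩
  case pos =>
  simp only [movA, movB, if_pos hq]
  cases hs : PySem.Str.split₀ q with
  | nil => exact ⟨hh, hi, hnd⟩
  | cons a tl =>
  cases tl with
  | nil => exact ⟨hh, hi, hnd⟩
  | cons url tl2 =>
  cases tl2 with
  | cons t ts => exact ⟨hh, hi, hnd⟩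
  | nil =>
  dsimp only
  by_cases huc : url = c
  · subst huc
    have hmem : url ∈ h := by rw [hh]; simp
    simp only [if_pos hmem, eq_self_iff_true, if_true]
    have hidx : PySem.List.index? h url = some b.reverse.length :=
      index?_of_split hh (by simpa using hcb)
    exact ⟨hh, by simp only [hidx, Option.getD_some, List.length_reverse], hnd⟩
  · by_cases hub : url ∈ b
    · have hmem : url ∈ h := by rw [hh]; simp [hub]
      simp only [if_pos hmem, if_neg huc, if_pos hub]
      obtain ⟨p, rest, hsp, hup⟩ := first_split hub
      have hcu : c ≠ url := fun e => hcb (e ▸ hub)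
      have hseek : seekBack b c f url = (rest, url, p.reverse ++ c :: f) := by
        rw [hsp]; exact seekBack_spec url p rest c f hup hcu
      rw [hseek]
      have hre : h = rest.reverse ++ url :: (p.reverse ++ c :: f) := by rw [hh, hsp]; simp
      have hur : url ∉ rest.reverse := by
        have hnb := hsp ▸ hb
        simp only [List.nodup_append, List.nodup_cons] at hnb
        simp only [List.mem_reverse]
        exact hnb.2.1.1
      have hidx := index?_of_split hre hur
      exact ⟨hre, by rw [hidx]; simp, hnd⟩
    · by_cases huf : url ∈ f
      · have hmem : url ∈ h := by rw [hh]; simp [huf]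
        simp only [if_pos hmem, if_neg huc, if_neg hub, if_pos huf]
        obtain ⟨p, rest, hsp, hup⟩ := first_split huf
        have hcu : c ≠ url := fun e => hcf (e ▸ huf)
        have hseek : seekFwd b c f url = (p.reverse ++ c :: b, url, rest) := by
          rw [hsp]; exact seekFwd_spec url p rest c b hup hcu
        rw [hseek]
        have hre : h = (b.reverse ++ c :: p) ++ url :: rest := by rw [hh, hsp]; simp
        have hupre : url ∉ b.reverse ++ c :: p := by
          simp only [List.mem_append, List.mem_reverse, List.mem_cons, not_or]
          exact ⟨hub, huc, hup⟩
        have hidx := index?_of_split hre hupre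
        refine ⟨by rw [hre]; simp, ?_, hnd⟩
        rw [hidx]
        simp [List.length_append]
        omega
      · have hmem : url ∉ h := by
          rw [hh]
          simp only [List.mem_append, List.mem_reverse, List.mem_cons, not_or]
          exact ⟨hub, huc, huf⟩
        simp only [if_neg hmem, if_neg huc, if_neg hub, if_neg huf]
        have hnn : (0:Int) ≤ i + 1 := by rw [hi]; positivity
        have hslice : PySem.List.slice h none (some (i + 1)) = b.reverse ++ [c] := by
          rw [PySem.List.slice_to _ hnn, hh]
          have ht : (i + 1).toNat = b.reverse.length + 1 := by rw [hi]; simp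
          rw [ht, List.take_length_add_append]
          simp
        refine ⟨by rw [hslice]; simp, by rw [hi, List.length_cons]; push_cast; omega, ?_⟩
        rw [hslice]
        have hpre : (b.reverse ++ [c]).Nodup := by
          have hsub : List.Sublist (b.reverse ++ [c]) h := by
            rw [hh]
            have : b.reverse ++ c :: f = (b.reverse ++ [c]) ++ f := by simp
            rw [this]
            exact List.sublist_append_left _ _
          exact hnd.sublist hsub
        simp only [List.nodup_append, hpre, List.nodup_cons, List.not_mem_nil, not_false_iff,
          List.nodup_nil, and_true, true_and, List.disjoint_left]
        intro x hx y hy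
        simp only [List.mem_singleton] at hy
        subst hy
        intro e
        subst e
        apply hmem
        rw [hh]
        rcases List.mem_append.mp hx with hx1 | hx1
        · exact List.mem_append.mpr (Or.inl hx1)
        · simp only [List.mem_singleton] at hx1
          subst hx1
          simp

theorem del_rel {h : List String} {i : Int} {b : List String} {c : String} {f : List String}
    (q : String) (hr : RInv h i b c f) :
    RInv (delA q h i).1 (delA q h i).2.1 (delB q b c f).1 c (delB q b c f).2.1 ∧
      (delA q h i).2.2 = (delB q b c f).2.2 := by
  obtain ⟨hh, hi, hnd⟩ := hr
  obtain ⟨hb, hf, hcb, hcf, hbf⟩ := nodup_parts (hh ▸ hnd)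
  by_cases hq : PySem.Str.isIn "DEL" q = true
  case neg => simp only [delA, delB, if_neg hq]; exact ⟨⟨hh, hi, hnd⟩, by trivial⟩
  case pos =>
  simp only [delA, delB, if_pos hq]
  cases hs : PySem.Str.split₀ q with
  | nil => exact ⟨⟨hh, hi, hnd⟩, by trivial⟩
  | cons a tl =>
  cases tl with
  | nil => exact ⟨⟨hh, hi, hnd⟩, by trivial⟩
  | cons url tl2 =>
  cases tl2 with
  | cons t ts => exact ⟨⟨hh, hi, hnd⟩, by trivial⟩
  | nil =>
  dsimp only
  have hgd : PySem.List.pyGetD h i "" = c := by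
    rw [hi, hh, ← List.length_reverse (as := b)]
    exact getD_rep b.reverse c f
  by_cases huc : url = c
  · have hA : url ∉ h ∨ PySem.List.pyGetD h i "" = url := Or.inr (by rw [hgd, huc])
    have hB : url = c ∨ (url ∉ b ∧ url ∉ f) := Or.inl huc
    simp only [if_pos hA, if_pos hB]
    exact ⟨⟨hh, hi, hnd⟩, by trivial⟩
  · by_cases hub : url ∈ b
    · have hmem : url ∈ h := by rw [hh]; simp [hub]
      have hA : ¬ (url ∉ h ∨ PySem.List.pyGetD h i "" = url) := by
        rw [hgd]; push_neg; exact ⟨hmem, fun e => huc e.symm⟩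
      have hB : ¬ (url = c ∨ (url ∉ b ∧ url ∉ f)) := by
        push_neg; exact ⟨huc, fun hn => absurd hub hn⟩
      simp only [if_neg hA, if_neg hB, if_pos hub]
      have hmr : url ∈ b.reverse := List.mem_reverse.mpr hub
      have hidx : PySem.List.index? h url = PySem.List.index? b.reverse url := by
        rw [hh]; exact PySem.List.index?_append_of_mem _ hmr
      obtain ⟨k, hk⟩ := Option.isSome_iff_exists.mp ((PySem.List.index?_isSome_iff _ _).mpr hmr)
      have hklt : k < b.length := by have := index?_bound hk; simpa using this
      have hclt : ((k : Nat) : Int) < i := by rw [hi]; exact_mod_cast hklt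
      rw [hidx, hk]
      simp only [Option.getD_some, if_pos hclt,
        PySem.List.remove?_eq_some_erase _ _ hmem, PySem.List.remove?_eq_some_erase _ _ hub,
        Option.getD_some]
      refine ⟨⟨?_, ?_, ?_⟩, by trivial⟩
      · rw [hh, List.erase_append_left _ hmr, reverse_erase_nodup hb]
      · rw [hi, List.length_erase_of_mem hub]
        have hpos : 0 < b.length := List.length_pos_of_mem hub
        omega
      · exact hnd.sublist List.erase_sublist
    · by_cases huf : url ∈ f
      · have hmem : url ∈ h := by rw [hh]; simp [huf]
        have hA : ¬ (url ∉ h ∨ PySem.List.pyGetD h i "" = url) := by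
          rw [hgd]; push_neg; exact ⟨hmem, fun e => huc e.symm⟩
        have hB : ¬ (url = c ∨ (url ∉ b ∧ url ∉ f)) := by
          push_neg; exact ⟨huc, fun _ => huf⟩
        simp only [if_neg hA, if_neg hB, if_neg hub]
        obtain ⟨p, rest, hsp, hup⟩ := first_split huf
        have hre : h = (b.reverse ++ c :: p) ++ url :: rest := by rw [hh, hsp]; simp
        have hupre : url ∉ b.reverse ++ c :: p := by
          simp only [List.mem_append, List.mem_reverse, List.mem_cons, not_or]
          exact ⟨hub, huc, hup⟩
        have hidx := index?_of_split hre hupre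
        have hnlt : ¬ ((((PySem.List.index? h url).getD 0 : Nat) : Int) < i) := by
          rw [hidx, hi]
          simp [List.length_append]
          omega
        rw [if_neg hnlt]
        simp only [PySem.List.remove?_eq_some_erase _ _ hmem, PySem.List.remove?_eq_some_erase _ _ huf,
          Option.getD_some]
        refine ⟨⟨?_, hi, ?_⟩, by trivial⟩
        · have hub' : url ∉ b.reverse := by simpa using hub
          rw [hh, List.erase_append_right _ hub', List.erase_cons_tail (by simp; exact fun e => huc e.symm)]
        · exact hnd.sublist List.erase_sublist
      · have hA : url ∉ h ∨ PySem.List.pyGetD h i "" = url := by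
          left
          rw [hh]
          simp only [List.mem_append, List.mem_reverse, List.mem_cons, not_or]
          exact ⟨hub, huc, huf⟩
        have hB : url = c ∨ (url ∉ b ∧ url ∉ f) := Or.inr ⟨hub, huf⟩
        simp only [if_pos hA, if_pos hB]
        exact ⟨⟨hh, hi, hnd⟩, by trivial⟩

theorem bck_rel {h : List String} {i : Int} {b : List String} {c : String} {f : List String}
    (q : String) (ansA ansB : List String) (hr : RInv h i b c f) (hans : ansA = ansB) :
    RInv h (bckA q h i ansA).1 (bckB q b c f ansB).1 (bckB q b c f ansB).2.1 (bckB q b c f ansB).2.2.1 ∧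
      (bckA q h i ansA).2 = (bckB q b c f ansB).2.2.2 := by
  subst hans
  obtain ⟨hh, hi, hnd⟩ := hr
  by_cases hq : PySem.Str.isIn "BCK" q = true
  · simp only [bckA, bckB, if_pos hq]
    cases b with
    | nil =>
      have hi0 : i = 0 := by rw [hi]; simp
      subst hi0
      dsimp only
      simp only [if_neg (by simp : ¬ ((0:Int) ≠ 0))]
      refine ⟨⟨hh, by simp, hnd⟩, ?_⟩
      have : PySem.List.pyGetD h 0 "" = c := by
        rw [hh]
        exact getD_rep [] c f
      rw [this]
    | cons b0 rest =>
      dsimp only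
      have hne : i ≠ 0 := by rw [hi, List.length_cons]; push_cast; omega
      simp only [if_pos hne]
      have hi' : i - 1 = (rest.length : Int) := by rw [hi, List.length_cons]; push_cast; omega
      have hget : PySem.List.pyGetD h (i - 1) "" = b0 := by
        rw [hi', hh]
        have : (b0 :: rest).reverse ++ c :: f = rest.reverse ++ b0 :: (c :: f) := by simp
        rw [this, ← List.length_reverse (as := rest)]
        exact getD_rep rest.reverse b0 (c :: f)
      refine ⟨⟨by rw [hh]; simp, hi', hnd⟩, by rw [hget]⟩
  · simp only [bckA, bckB, if_neg hq]
    exact ⟨⟨hh, hi, hnd⟩, trivial⟩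

theorem fwd_rel {h : List String} {i : Int} {b : List String} {c : String} {f : List String}
    (q : String) (ansA ansB : List String) (hr : RInv h i b c f) (hans : ansA = ansB) :
    RInv h (fwdA q h i ansA).1 (fwdB q b c f ansB).1 (fwdB q b c f ansB).2.1 (fwdB q b c f ansB).2.2.1 ∧
      (fwdA q h i ansA).2 = (fwdB q b c f ansB).2.2.2 := by
  subst hans
  obtain ⟨hh, hi, hnd⟩ := hr
  have hlen : (h.length : Int) = (b.length : Int) + 1 + (f.length : Int) := by
    rw [hh]; simp [List.length_append]; push_cast; omega
  by_cases hq : PySem.Str.isIn "FWD" q = true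
  · simp only [fwdA, fwdB, if_pos hq]
    cases f with
    | nil =>
      dsimp only
      have hlt : ¬ (i < (h.length : Int) - 1) := by rw [hi, hlen]; simp
      simp only [if_neg hlt]
      refine ⟨⟨hh, hi, hnd⟩, ?_⟩
      have : PySem.List.pyGetD h i "" = c := by
        rw [hi, hh, ← List.length_reverse (as := b)]
        exact getD_rep b.reverse c []
      rw [this]
    | cons x rest =>
      dsimp only
      have hlt : i < (h.length : Int) - 1 := by
        rw [hi, hlen, List.length_cons]; push_cast; omega
      simp only [if_pos hlt]
      have hi' : i + 1 = ((c :: b).length : Int) := by rw [hi, List.length_cons]; push_cast; omega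
      have hget : PySem.List.pyGetD h (i + 1) "" = x := by
        rw [hi', hh]
        have : b.reverse ++ c :: x :: rest = (c :: b).reverse ++ x :: rest := by simp
        rw [this, ← List.length_reverse (as := c :: b)]
        exact getD_rep (c :: b).reverse x rest
      refine ⟨⟨by rw [hh]; simp, hi', hnd⟩, by rw [hget]⟩
  · simp only [fwdA, fwdB, if_neg hq]
    exact ⟨⟨hh, hi, hnd⟩, trivial⟩

-- one query step preserves the coupling between the two full states
def ZInv (sa : List String × Int × List String)
    (sb : List String × String × List String × List String) : Prop :=
  RInv sa.1 sa.2.1 sb.1 sb.2.1 sb.2.2.1 ∧ sa.2.2 = sb.2.2.2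

theorem inv_step (sa : List String × Int × List String)
    (sb : List String × String × List String × List String) (q : String)
    (h : ZInv sa sb) : ZInv (stepA sa q) (stepB sb q) := by
  obtain ⟨hr, hans⟩ := h
  have h1 := mov_rel (h := sa.1) (i := sa.2.1) q hr
  have h2 := del_rel (q := q) h1
  simp only [stepA, stepB]
  rw [← h2.2]
  by_cases hcont : (delA q (movA q sa.1 sa.2.1).1 (movA q sa.1 sa.2.1).2).2.2 = true
  · simp only [hcont, if_pos]
    exact ⟨h2.1, hans⟩
  · simp only [hcont, if_neg, Bool.false_eq_true, not_false_iff]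
    have h3 := bck_rel (q := q) sa.2.2 sb.2.2.2 h2.1 hans
    have h4 := fwd_rel (q := q) _ _ h3.1 h3.2
    exact ⟨h4.1, h4.2⟩

theorem inv_foldl (qs : List String) (sa : List String × Int × List String)
    (sb : List String × String × List String × List String)
    (h : ZInv sa sb) : ZInv (qs.foldl stepA sa) (qs.foldl stepB sb) := by
  induction qs generalizing sa sb with
  | nil => exact h
  | cons q qs ih => exact ih _ _ (inv_step sa sb q h)

-- ===== VERDICT (by name: the statement is the Claim_ definition above) =====
theorem solution_spec : Claim_equal_solution := by
  intro query _ _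
  unfold Spec_solution solution solution_alt
  exact (inv_foldl query _ _ ⟨⟨rfl, rfl, by simp⟩, rfl⟩).2
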